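-- pv_equiv track=rewrite | github.com/ddraa/Algorithm | Recursion/1074.py | solve
-- ===== SOURCE A (Python) =====
-- def solve(n, row, col):
--     if n == 0:
--         return 0
--     half = 2 ** (n - 1)
--
--     if row < half and col < half:
--         return solve(n - 1, row, col)
--     if row < half <= col:
--         return half * half + solve(n - 1, row, col - half)
--     if col < half <= row:
--         return 2 * half * half + solve(n - 1, row - half, col)
--     else:
--         return 3 * half * half + solve(n - 1, row - half, col - half)
-- ===== SOURCE B (Python) =====
-- def solve(n, row, col):
--     # Iterative top-down descent through the quadrant levels (no recursion).
--     result = 0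
--     for level in range(n, 0, -1):
--         half = 2 ** (level - 1)
--         if row >= half:
--             if col >= half:
--                 result += 3 * half * half
--                 row -= half
--                 col -= half
--             else:
--                 result += 2 * half * half
--                 row -= half
--         elif col >= half:
--             result += half * half
--             col -= half
--     return result
-- ===== Notes on version B (the rewrite author's own statement) =====
-- stated objective: alternative
-- what changed: Replaced A's four-way recursion with a single iterative loop over levels n..1 that accumulates the quadrant offsets and subtracts half from row/col in place.
import Mathlib
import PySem

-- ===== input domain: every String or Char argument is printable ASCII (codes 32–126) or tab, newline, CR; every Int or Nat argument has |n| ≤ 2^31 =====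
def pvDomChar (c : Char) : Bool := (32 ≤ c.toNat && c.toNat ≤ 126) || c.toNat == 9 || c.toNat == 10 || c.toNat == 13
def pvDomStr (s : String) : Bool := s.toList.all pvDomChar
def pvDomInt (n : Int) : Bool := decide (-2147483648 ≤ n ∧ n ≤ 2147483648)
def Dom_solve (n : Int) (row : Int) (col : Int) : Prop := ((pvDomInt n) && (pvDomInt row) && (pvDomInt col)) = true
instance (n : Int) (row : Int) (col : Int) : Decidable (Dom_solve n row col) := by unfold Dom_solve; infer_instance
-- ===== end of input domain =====

-- B replaces A's four-branch recursion by an iterative per-level loop (same quadrant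
-- arithmetic, no call stack); equivalence is about the return value only.

-- ===== PORT A =====
-- A recurses on n; for n < 0 the Python never reaches a base case (RecursionError),
-- which Pre_ excludes, so the guard 'n ≤ 0' below coincides with Python's 'n == 0' on Pre_.
def solve (n : Int) (row : Int) (col : Int) : Int :=
  if n ≤ 0 then 0
  else
    let half : Int := 2 ^ (n - 1).toNat
    if row < half ∧ col < half then solve (n - 1) row col
    else if row < half ∧ half ≤ col then half * half + solve (n - 1) row (col - half)
    else if col < half ∧ half ≤ row then 2 * half * half + solve (n - 1) (row - half) col
    else 3 * half * half + solve (n - 1) (row - half) (col - half)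
termination_by n.toNat
decreasing_by all_goals omega

-- ===== PORT B =====
def solveAltStep (st : Int × Int × Int) (level : Int) : Int × Int × Int :=
  let result := st.1
  let r := st.2.1
  let c := st.2.2
  let half : Int := 2 ^ (level - 1).toNat
  if half ≤ r then
    if half ≤ c then (result + 3 * half * half, r - half, c - half)
    else (result + 2 * half * half, r - half, c)
  else if half ≤ c then (result + half * half, r, c - half)
  else (result, r, c)

def solve_alt (n : Int) (row : Int) (col : Int) : Int :=
  ((PySem.List.pyRange n 0 (-1)).foldl solveAltStep (0, row, col)).1

-- ===== PRECONDITION & SPEC =====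
-- Pre_ excludes only n < 0, where A's recursion never reaches its base case and the
-- Python raises RecursionError; A returns on every n ≥ 0 and B matches it there.
def Pre_solve (n : Int) (row : Int) (col : Int) : Prop := 0 ≤ n
instance (n : Int) (row : Int) (col : Int) : Decidable (Pre_solve n row col) := by unfold Pre_solve; infer_instance
def pvWitness_solve : Int × Int × Int := (2, 3, 1)

def Spec_solve (n : Int) (row : Int) (col : Int) (out : Int) : Prop := out = solve_alt n row col
instance (n : Int) (row : Int) (col : Int) (out : Int) : Decidable (Spec_solve n row col out) := by unfold Spec_solve; infer_instance

-- ===== CLAIM (what is proved, stated in full; the proofs are below) =====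
def Claim_equal_solve : Prop := ∀ (n : Int) (row : Int) (col : Int), Dom_solve n row col → Pre_solve n row col → Spec_solve n row col (solve n row col)

-- ===== LEMMAS AND PROOFS =====

-- the loop body's result component is additive in the accumulated result
theorem foldl_step_shift (L : List Int) (a r c : Int) :
    L.foldl solveAltStep (a, r, c) =
      (a + (L.foldl solveAltStep (0, r, c)).1, (L.foldl solveAltStep (0, r, c)).2) := by
  induction L generalizing a r c with
  | nil => simp
  | cons x L ih =>
    simp only [List.foldl_cons]
    have hstep : solveAltStep (a, r, c) x =
        (a + (solveAltStep (0, r, c) x).1, (solveAltStep (0, r, c) x).2) := by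
      simp only [solveAltStep]
      split_ifs <;> simp
    rw [hstep]
    obtain ⟨b, r', c'⟩ := solveAltStep (0, r, c) x
    rw [ih, ih b r' c']
    simp [add_assoc]

theorem solve_eq_alt (k : Nat) (row col : Int) :
    solve (k : Int) row col = solve_alt (k : Int) row col := by
  induction k generalizing row col with
  | zero =>
    simp [solve, solve_alt, PySem.List.pyRange_neg_one_eq_nil]
  | succ k ih =>
    have hk : (0 : Int) < (k + 1 : Nat) := by exact_mod_cast Nat.succ_pos k
    have hrange := PySem.List.pyRange_neg_one_cons (a := ((k + 1 : Nat) : Int)) (b := 0) hk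
    have hone : ((k + 1 : Nat) : Int) - 1 = (k : Int) := by push_cast; ring
    rw [solve, solve_alt, hrange]
    simp only [List.foldl_cons, hone]
    have hguard : ¬ ((k + 1 : Nat) : Int) ≤ 0 := by omega
    rw [if_neg hguard]
    have htoNat : ((k : Int)).toNat = k := Int.toNat_natCast k
    have htoNat' : (((k + 1 : Nat) : Int) - 1).toNat = k := by omega
    simp only [htoNat]
    set half : Int := 2 ^ k with hhalf
    have hstep : solveAltStep (0, row, col) ((k + 1 : Nat) : Int) =
        let half : Int := 2 ^ (((k + 1 : Nat) : Int) - 1).toNat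
        if half ≤ row then
          if half ≤ col then (3 * half * half, row - half, col - half)
          else (2 * half * half, row - half, col)
        else if half ≤ col then (half * half, row, col - half)
        else ((0 : Int), row, col) := by
      simp only [solveAltStep]
      split_ifs <;> simp
    rw [hstep]
    simp only [htoNat', ← hhalf]
    by_cases hr : half ≤ row <;> by_cases hc : half ≤ col
    · rw [if_neg (by omega : ¬ (row < half ∧ col < half)),
          if_neg (by omega : ¬ (row < half ∧ half ≤ col)),
          if_neg (by omega : ¬ (col < half ∧ half ≤ row)),
          if_pos hr, if_pos hc]
      rw [foldl_step_shift, ih]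
      simp [solve_alt]
    · rw [if_neg (by omega : ¬ (row < half ∧ col < half)),
          if_neg (by omega : ¬ (row < half ∧ half ≤ col)),
          if_pos (by omega : col < half ∧ half ≤ row),
          if_pos hr, if_neg hc]
      rw [foldl_step_shift, ih]
      simp [solve_alt]
    · rw [if_neg (by omega : ¬ (row < half ∧ col < half)),
          if_pos (by omega : row < half ∧ half ≤ col),
          if_neg hr, if_pos hc]
      rw [foldl_step_shift, ih]
      simp [solve_alt]
    · rw [if_pos (by omega : row < half ∧ col < half),
          if_neg hr, if_neg hc]
      rw [foldl_step_shift, ih]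
      simp [solve_alt]

-- ===== VERDICT (by name: the statement is the Claim_ definition above) =====
theorem solve_spec : Claim_equal_solve := by
  intro n row col _ hpre
  unfold Pre_solve at hpre
  have hn : n = ((n.toNat : Nat) : Int) := by omega
  unfold Spec_solve
  rw [hn]
  exact solve_eq_alt n.toNat row col
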